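-- pv_equiv track=rewrite | github.com/Florilaige/NSI | Homework/DM1.py | vue_sur_la_mer
-- ===== SOURCE A (Python) =====
-- def vue_sur_la_mer(lst):
--     a = 0
--     els = []
--     for i in reversed(lst):
--         if i>a:
--             a = i
--             els.append(i)
--     return els
-- ===== SOURCE B (Python) =====
-- def vue_sur_la_mer(lst):
--     # Monotonic stack, scanned left-to-right: after the loop the stack holds
--     # (top-first) every element strictly greater than all elements to its right.
--     stack = []
--     for x in lst:
--         while stack and stack[-1] <= x:
--             stack.pop()
--         stack.append(x)
--     return [x for x in reversed(stack) if x > 0]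
-- ===== Notes on version B (the rewrite author's own statement) =====
-- stated objective: alternative
-- what changed: Replaces the reversed scan with a scalar running max by a left-to-right monotonic stack (pop while top <= x), then returns the stack reversed and filtered to positive values.
import Mathlib
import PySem

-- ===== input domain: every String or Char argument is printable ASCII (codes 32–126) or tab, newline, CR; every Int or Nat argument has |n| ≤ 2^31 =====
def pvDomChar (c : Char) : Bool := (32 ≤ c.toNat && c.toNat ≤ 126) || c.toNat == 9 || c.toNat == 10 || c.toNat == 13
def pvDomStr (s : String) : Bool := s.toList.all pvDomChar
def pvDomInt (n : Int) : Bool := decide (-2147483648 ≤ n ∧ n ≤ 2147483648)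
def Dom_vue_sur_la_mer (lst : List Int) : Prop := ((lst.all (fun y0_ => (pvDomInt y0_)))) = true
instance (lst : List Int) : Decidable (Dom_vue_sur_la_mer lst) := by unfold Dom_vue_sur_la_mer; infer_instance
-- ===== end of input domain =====

-- B replaces A's reversed scan with a running max by a left-to-right monotonic
-- stack (alternative algorithm, same O(n) cost).

-- ===== PORT A =====
-- A: reversed scan keeping a scalar running max `a` (initially 0), appending i when i > a.
def vue_sur_la_mer (lst : List Int) : List Int :=
  (lst.reverse.foldl
    (fun (st : Int × List Int) i => if i > st.1 then (i, st.2 ++ [i]) else st)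
    (0, [])).2

-- ===== PORT B =====
-- `stack` is represented top-at-head (Python pushes/pops at the list's end), so
-- Python's `reversed(stack)` iteration order is exactly this list's order.
def pvPopWhile (x : Int) : List Int → List Int
  | [] => []
  | t :: rest => if t ≤ x then pvPopWhile x rest else t :: rest

def vue_sur_la_mer_alt (lst : List Int) : List Int :=
  (lst.foldl (fun stack x => x :: pvPopWhile x stack) []).filter (fun x => decide (0 < x))

-- ===== PRECONDITION & SPEC =====
def Spec_vue_sur_la_mer (lst : List Int) (out : List Int) : Prop := out = vue_sur_la_mer_alt lst
instance (lst : List Int) (out : List Int) : Decidable (Spec_vue_sur_la_mer lst out) := by unfold Spec_vue_sur_la_mer; infer_instance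

-- ===== CLAIM (what is proved, stated in full; the proofs are below) =====
def Claim_equal_vue_sur_la_mer : Prop := ∀ (lst : List Int), Dom_vue_sur_la_mer lst → Spec_vue_sur_la_mer lst (vue_sur_la_mer lst)

-- ===== LEMMAS AND PROOFS =====

-- canonical description of both results: elements positive and greater than all elements to their right
def pvVis : List Int → List Int
  | [] => []
  | x :: l => if 0 < x ∧ ∀ y ∈ l, y < x then pvVis l ++ [x] else pvVis l

-- ---- A side ----
def pvStA (l : List Int) : Int × List Int :=
  l.reverse.foldl
    (fun (st : Int × List Int) i => if i > st.1 then (i, st.2 ++ [i]) else st)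
    (0, [])

theorem pvStA_cons (x : Int) (l : List Int) :
    pvStA (x :: l) = (if x > (pvStA l).1 then (x, (pvStA l).2 ++ [x]) else pvStA l) := by
  simp [pvStA, List.foldl_append]

theorem pvStA_inv (l : List Int) :
    0 ≤ (pvStA l).1 ∧ (∀ y ∈ l, y ≤ (pvStA l).1) ∧ ((pvStA l).1 = 0 ∨ (pvStA l).1 ∈ l)
      ∧ (pvStA l).2 = pvVis l := by
  induction l with
  | nil => simp [pvStA, pvVis]
  | cons x l ih =>
    obtain ⟨h0, hub, hmem, hout⟩ := ih
    rw [pvStA_cons]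
    have hiff : x > (pvStA l).1 ↔ (0 < x ∧ ∀ y ∈ l, y < x) := by
      constructor
      · intro h
        exact ⟨lt_of_le_of_lt h0 h, fun y hy => lt_of_le_of_lt (hub y hy) h⟩
      · rintro ⟨hx, hall⟩
        rcases hmem with h | h
        · omega
        · exact hall _ h
    by_cases h : x > (pvStA l).1
    · simp only [if_pos h, pvVis, if_pos (hiff.mp h)]
      refine ⟨le_of_lt (lt_of_le_of_lt h0 h), ?_, ?_, by rw [hout]⟩
      · intro y hy
        rcases List.mem_cons.mp hy with rfl | hy
        · exact le_refl _
        · exact le_of_lt (lt_of_le_of_lt (hub y hy) h)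
      · right; exact List.mem_cons_self ..
    · have hnot : ¬ (0 < x ∧ ∀ y ∈ l, y < x) := fun hc => h (hiff.mpr hc)
      simp only [if_neg h, pvVis, if_neg hnot]
      refine ⟨h0, ?_, ?_, hout⟩
      · intro y hy
        rcases List.mem_cons.mp hy with rfl | hy
        · omega
        · exact hub y hy
      · rcases hmem with h' | h'
        · exact Or.inl h'
        · exact Or.inr (List.mem_cons_of_mem _ h')

theorem pvA_eq_vis (l : List Int) : vue_sur_la_mer l = pvVis l := (pvStA_inv l).2.2.2

-- ---- B side ----
def pvStB (l : List Int) : List Int := l.foldl (fun stack x => x :: pvPopWhile x stack) []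

-- popping elements ≤ x then ≤ y with y ≤ x does nothing more
theorem pvPopWhile_le {y x : Int} (h : y ≤ x) (s : List Int) :
    pvPopWhile y (pvPopWhile x s) = pvPopWhile x s := by
  induction s with
  | nil => simp [pvPopWhile]
  | cons t rest ih =>
    by_cases ht : t ≤ x
    · simp [pvPopWhile, if_pos ht, ih]
    · simp [pvPopWhile, if_neg ht, if_neg (by omega : ¬ t ≤ y)]

-- net effect on an initial stack of running the rest of the list
def pvPops : List Int → List Int → List Int
  | [], s => s
  | x :: l, s => pvPops l (pvPopWhile x s)

theorem pvPops_nil (l : List Int) : pvPops l [] = [] := by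
  induction l with
  | nil => rfl
  | cons x l ih => simp [pvPops, pvPopWhile, ih]

theorem pvPops_push (l : List Int) : ∀ (x : Int) (s : List Int),
    pvPops l (x :: pvPopWhile x s) = pvPops l [x] ++ pvPops l (pvPopWhile x s) := by
  induction l with
  | nil => intro x s; simp [pvPops]
  | cons y l ih =>
    intro x s
    by_cases hx : x ≤ y
    · simp [pvPops, pvPopWhile, if_pos hx, pvPops_nil]
    · simp only [pvPops, pvPopWhile, if_neg hx]
      rw [ih, pvPopWhile_le (by omega : y ≤ x)]

theorem pvStB_gen (l : List Int) : ∀ s : List Int,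
    l.foldl (fun stack x => x :: pvPopWhile x stack) s = pvStB l ++ pvPops l s := by
  induction l with
  | nil => intro s; simp [pvStB, pvPops]
  | cons x l ih =>
    intro s
    have hstep : pvStB (x :: l) = pvStB l ++ pvPops l [x] := by
      have : pvStB (x :: l) = l.foldl (fun stack x => x :: pvPopWhile x stack) [x] := by
        simp [pvStB, pvPopWhile]
      rw [this, ih [x]]
    calc (x :: l).foldl (fun stack x => x :: pvPopWhile x stack) s
        = l.foldl (fun stack x => x :: pvPopWhile x stack) (x :: pvPopWhile x s) := by
          simp
      _ = pvStB l ++ pvPops l (x :: pvPopWhile x s) := ih _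
      _ = pvStB l ++ (pvPops l [x] ++ pvPops l (pvPopWhile x s)) := by rw [pvPops_push]
      _ = pvStB (x :: l) ++ pvPops (x :: l) s := by
          rw [hstep, pvPops, List.append_assoc]

theorem pvPops_single (l : List Int) : ∀ x : Int,
    pvPops l [x] = if ∀ y ∈ l, y < x then [x] else [] := by
  induction l with
  | nil => intro x; simp [pvPops]
  | cons y l ih =>
    intro x
    by_cases hx : x ≤ y
    · have hy : ¬ ∀ z ∈ y :: l, z < x :=
        fun h => absurd (h y (List.mem_cons_self ..)) (by omega)
      simp only [pvPops, pvPopWhile, if_pos hx, pvPops_nil, if_neg hy]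
    · simp only [pvPops, pvPopWhile, if_neg hx, ih x]
      by_cases hall : ∀ y ∈ l, y < x
      · rw [if_pos hall, if_pos (by intro z hz; rcases List.mem_cons.mp hz with rfl | hz
                                    · omega
                                    · exact hall z hz)]
      · rw [if_neg hall, if_neg (by intro h; exact hall fun z hz => h z (List.mem_cons_of_mem _ hz))]

theorem pvB_eq_vis (l : List Int) : vue_sur_la_mer_alt l = pvVis l := by
  induction l with
  | nil => rfl
  | cons x l ih =>
    have hstep : pvStB (x :: l) = pvStB l ++ pvPops l [x] := by
      have : pvStB (x :: l) = l.foldl (fun stack x => x :: pvPopWhile x stack) [x] := by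
        simp [pvStB, pvPopWhile]
      rw [this, pvStB_gen l [x]]
    have halt : ∀ m : List Int, vue_sur_la_mer_alt m = (pvStB m).filter (fun x => decide (0 < x)) := by
      intro m; rfl
    rw [halt, hstep, List.filter_append, ← halt, ih, pvPops_single l x, pvVis]
    by_cases hall : ∀ y ∈ l, y < x
    · by_cases hx : 0 < x
      · rw [if_pos hall, if_pos ⟨hx, hall⟩]; simp [hx]
      · rw [if_pos hall, if_neg (by tauto)]; simp [hx]
    · rw [if_neg hall, if_neg (by tauto)]; simp

-- ===== VERDICT (by name: the statement is the Claim_ definition above) =====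
theorem vue_sur_la_mer_spec : Claim_equal_vue_sur_la_mer := by
  intro lst _
  unfold Spec_vue_sur_la_mer
  rw [pvA_eq_vis, pvB_eq_vis]
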